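-- pv_equiv track=rewrite | github.com/sifanfita/a2sv | week 1/watering-plants.py | wateringPlants
-- ===== SOURCE A (Python) =====
-- def wateringPlants(plants, capacity):
--     #Tracks the number of steps
--     step = 0
--     currCapacity = capacity
--     for idx in range(len(plants)):
--         step += 1
--         currCapacity -= plants[idx]
--         if idx <= (len(plants) -2) and currCapacity < plants[idx + 1]:
--             step += 2 * (idx+1)
--             currCapacity = capacity
--
--     return step
-- ===== SOURCE B (Python) =====
-- def wateringPlants(plants, capacity):
--     # Stage 1: prefix sums of water needs.
--     n = len(plants)
--     prefix = [0]
--     total = 0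
--     for p in plants:
--         total += p
--         prefix.append(total)
--     # Stage 2: refill points = segment breaks i where water used since the
--     # last refill plus plants[i] exceeds capacity.
--     refills = []
--     last = 0
--     for i in range(1, n):
--         if prefix[i + 1] - prefix[last] > capacity:
--             refills.append(i)
--             last = i
--     # Closed form: one forward step per plant, plus a 2*i round trip per refill at i.
--     return n + 2 * sum(refills)
-- ===== Notes on version B (the rewrite author's own statement) =====
-- stated objective: alternative
-- what changed: Replaces A's single-pass water-level simulation (look-ahead refill check against the next plant, mutating step/currCapacity) by a staged prefix-sum algorithm: build the prefix sums of needs, find the refill indices as segment breaks where prefix[i+1]-prefix[last] exceeds capacity, and return the closed form n + 2*sum(refill indices).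
import Mathlib
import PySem

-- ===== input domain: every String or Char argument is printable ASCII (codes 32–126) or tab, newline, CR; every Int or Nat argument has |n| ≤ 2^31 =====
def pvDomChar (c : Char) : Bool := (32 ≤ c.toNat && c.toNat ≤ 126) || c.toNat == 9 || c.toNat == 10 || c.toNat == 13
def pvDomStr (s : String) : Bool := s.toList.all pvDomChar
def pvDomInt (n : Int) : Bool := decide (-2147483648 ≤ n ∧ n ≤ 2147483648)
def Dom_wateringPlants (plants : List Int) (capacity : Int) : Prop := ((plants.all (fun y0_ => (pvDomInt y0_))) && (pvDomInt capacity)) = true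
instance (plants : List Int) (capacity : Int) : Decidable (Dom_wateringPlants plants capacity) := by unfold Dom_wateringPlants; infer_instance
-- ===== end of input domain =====

-- B replaces A's look-ahead water-level simulation by a staged prefix-sum
-- algorithm (refill indices as segment breaks, closed-form step count).

-- ===== PORT A =====
-- A's for-loop over range(len(plants)): recursion on the number of remaining
-- iterations k (idx = current index), state (step, currCapacity).
def goA (plants : List Int) (capacity : Int) : Nat → Nat → Int × Int → Int × Int
  | _, 0, s => s
  | idx, Nat.succ k, s =>
    let step := s.1 + 1
    let curr := s.2 - plants.getD idx 0
    if idx + 2 ≤ plants.length ∧ curr < plants.getD (idx + 1) 0 then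
      goA plants capacity (idx + 1) k (step + 2 * ((idx : Int) + 1), capacity)
    else
      goA plants capacity (idx + 1) k (step, curr)

def wateringPlants (plants : List Int) (capacity : Int) : Int :=
  (goA plants capacity 0 plants.length (0, capacity)).1

-- ===== PORT B =====
-- Source B stage 1: `for p in plants: total += p; prefix.append(total)` —
-- structural recursion on plants carrying the running total.
def pvPrefix : List Int → Int → List Int
  | [], _ => []
  | p :: rest, total => (total + p) :: pvPrefix rest (total + p)

-- Source B stage 2: `for i in range(1, n)` with state (last, refills) — recursion
-- on the number m of remaining indices, j the current index.
def goBScan (prefixL : List Int) (capacity : Int) : Nat → Nat → Nat → List Int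
  | 0, _, _ => []
  | Nat.succ m, j, last =>
    if prefixL.getD (j + 1) 0 - prefixL.getD last 0 > capacity then
      (j : Int) :: goBScan prefixL capacity m (j + 1) j
    else
      goBScan prefixL capacity m (j + 1) last

def wateringPlants_alt (plants : List Int) (capacity : Int) : Int :=
  let n := plants.length
  let prefixL := 0 :: pvPrefix plants 0
  let refills := goBScan prefixL capacity (n - 1) 1 0
  (n : Int) + 2 * refills.sum

-- ===== PRECONDITION & SPEC =====
def Spec_wateringPlants (plants : List Int) (capacity : Int) (out : Int) : Prop := out = wateringPlants_alt plants capacity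
instance (plants : List Int) (capacity : Int) (out : Int) : Decidable (Spec_wateringPlants plants capacity out) := by unfold Spec_wateringPlants; infer_instance

-- ===== CLAIM (what is proved, stated in full; the proofs are below) =====
def Claim_equal_wateringPlants : Prop := ∀ (plants : List Int) (capacity : Int), Dom_wateringPlants plants capacity → Spec_wateringPlants plants capacity (wateringPlants plants capacity)

-- ===== LEMMAS AND PROOFS =====

-- one-step unfoldings (definitional)
lemma goA_step (plants : List Int) (capacity : Int) (i k : Nat) (step w : Int) :
    goA plants capacity i (k + 1) (step, w)
      = if i + 2 ≤ plants.length ∧ w - plants.getD i 0 < plants.getD (i + 1) 0 then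
          goA plants capacity (i + 1) k (step + 1 + 2 * ((i : Int) + 1), capacity)
        else
          goA plants capacity (i + 1) k (step + 1, w - plants.getD i 0) := rfl

lemma goBScan_step (prefixL : List Int) (capacity : Int) (m j last : Nat) :
    goBScan prefixL capacity (m + 1) j last
      = if prefixL.getD (j + 1) 0 - prefixL.getD last 0 > capacity then
          (j : Int) :: goBScan prefixL capacity m (j + 1) j
        else
          goBScan prefixL capacity m (j + 1) last := rfl

-- The prefix list Source B builds holds the partial sums of `plants`.
lemma pvPrefix_getD (plants : List Int) (total : Int) :
    ∀ j : Nat, j ≤ plants.length →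
      ((total :: pvPrefix plants total).getD j 0) = total + (plants.take j).sum := by
  induction plants generalizing total with
  | nil =>
    intro j hj
    simp only [List.length_nil, Nat.le_zero] at hj
    subst hj
    simp
  | cons p rest ih =>
    intro j hj
    cases j with
    | zero => simp
    | succ j' =>
      have := ih (total + p) j' (by simpa using hj)
      simpa [pvPrefix, List.getD, add_assoc] using this

-- Main invariant: A's loop from index i with state
-- (step, capacity - (S(i) - S(last))) — S = prefix sums — computes
-- step + (#remaining) + 2 * (sum of the refill indices B's scan finds from i+1).
lemma goA_eq_scan (plants : List Int) (capacity : Int) :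
    ∀ (m i last : Nat) (step : Int), i + 1 + m = plants.length → last ≤ i →
      (goA plants capacity i (m + 1)
        (step, capacity - ((plants.take i).sum - (plants.take last).sum))).1
      = step + (m + 1 : Int) +
        2 * (goBScan (0 :: pvPrefix plants 0) capacity m (i + 1) last).sum := by
  intro m
  induction m with
  | zero =>
    intro i last step hi hlast
    rw [goA_step, if_neg (by intro h; omega)]
    simp [goA, goBScan]
  | succ m ih =>
    intro i last step hi hlast
    have hlt : i < plants.length := by omega
    have hlt1 : i + 1 < plants.length := by omega
    have hgetD : plants.getD i 0 = plants[i] := by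
      simp [List.getD_eq_getElem?_getD, List.getElem?_eq_getElem hlt]
    have hgetD1 : plants.getD (i + 1) 0 = plants[i + 1] := by
      simp [List.getD_eq_getElem?_getD, List.getElem?_eq_getElem hlt1]
    have hS1 : (plants.take (i + 1)).sum = (plants.take i).sum + plants[i] :=
      List.sum_take_succ plants i hlt
    have hS2 : (plants.take (i + 2)).sum = (plants.take (i + 1)).sum + plants[i + 1] :=
      List.sum_take_succ plants (i + 1) hlt1
    have hP2 : ((0 :: pvPrefix plants 0).getD (i + 2) 0) = (plants.take (i + 2)).sum := by
      simpa using pvPrefix_getD plants 0 (i + 2) (by omega)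
    have hPl : ((0 :: pvPrefix plants 0).getD last 0) = (plants.take last).sum := by
      simpa using pvPrefix_getD plants 0 last (by omega)
    -- the two refill conditions agree
    have hcond : (i + 2 ≤ plants.length ∧
        capacity - ((plants.take i).sum - (plants.take last).sum) - plants.getD i 0
          < plants.getD (i + 1) 0)
        ↔ ((0 :: pvPrefix plants 0).getD (i + 1 + 1) 0
            - (0 :: pvPrefix plants 0).getD last 0 > capacity) := by
      rw [show i + 1 + 1 = i + 2 from rfl, hP2, hPl, hgetD, hgetD1]
      constructor
      · intro h; have := h.2; omega
      · intro h; exact ⟨by omega, by omega⟩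
    rw [goA_step, goBScan_step]
    by_cases hc : ((0 :: pvPrefix plants 0).getD (i + 1 + 1) 0
        - (0 :: pvPrefix plants 0).getD last 0 > capacity)
    · rw [if_pos (hcond.mpr hc), if_pos hc]
      have hrec := ih (i + 1) (i + 1) (step + 1 + 2 * ((i : Int) + 1)) (by omega) (le_refl _)
      simp only [sub_self, sub_zero] at hrec
      rw [hrec]
      simp only [List.sum_cons]
      push_cast
      ring
    · rw [if_neg (fun h => hc (hcond.mp h)), if_neg hc]
      have hcurr : capacity - ((plants.take i).sum - (plants.take last).sum) - plants.getD i 0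
          = capacity - ((plants.take (i + 1)).sum - (plants.take last).sum) := by
        rw [hgetD, hS1]; ring
      rw [hcurr, ih (i + 1) last (step + 1) (by omega) (by omega)]
      push_cast
      ring

-- ===== VERDICT (by name: the statement is the Claim_ definition above) =====
theorem wateringPlants_spec : Claim_equal_wateringPlants := by
  intro plants capacity _
  unfold Spec_wateringPlants wateringPlants wateringPlants_alt
  cases hn : plants.length with
  | zero =>
    have : plants = [] := List.length_eq_zero_iff.mp hn
    subst this
    simp [goA, goBScan]
  | succ m =>
    show (goA plants capacity 0 (m + 1) (0, capacity)).1
        = ((m + 1 : Nat) : Int)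
          + 2 * (goBScan (0 :: pvPrefix plants 0) capacity (m + 1 - 1) 1 0).sum
    have h := goA_eq_scan plants capacity m 0 0 0 (by omega) (le_refl 0)
    simp only [List.take_zero, List.sum_nil, sub_zero, sub_self] at h
    rw [show m + 1 - 1 = m from rfl, show (0 : Nat) + 1 = 1 from rfl] at *
    rw [h]
    push_cast
    ring
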